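-- pv_equiv track=rewrite | github.com/hahuyhieu2k5/23174600119_HA_HUY_HIEU_17A2 | lab5/bai3.py | tim_tu_xuat_hien_nhieu_nhat
-- ===== SOURCE A (Python) =====
-- def dem_so_lan_xuat_hien(chuoi, tu_can_tim):
--   """
--   Hàm đếm số lần xuất hiện của từ trong chuỗi.
--
--   Tham số:
--     chuoi: Chuỗi văn bản cần tìm kiếm.
--     tu_can_tim: Từ cần tìm kiếm.
--
--   Trả về:
--     Số lần xuất hiện của từ trong chuỗi.
--   """
--   so_lan_xuat_hien = 0
--   for i in range(len(chuoi)):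
--     if chuoi[i:].startswith(tu_can_tim):
--       so_lan_xuat_hien += 1
--   return so_lan_xuat_hien
--
-- def tim_tu_xuat_hien_nhieu_nhat(chuoi):
--   """
--   Hàm tìm từ xuất hiện nhiều nhất trong chuỗi.
--
--   Tham số:
--     chuoi: Chuỗi văn bản cần tìm kiếm.
--
--   Trả về:
--     Từ xuất hiện nhiều nhất trong chuỗi và số lần xuất hiện của từ đó.
--   """
--   tu_xuat_hien_nhieu_nhat = ""
--   so_lan_xuat_hien_nhieu_nhat = 0
--   for tu in chuoi.split():
--     so_lan_xuat_hien = dem_so_lan_xuat_hien(chuoi, tu)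
--     if so_lan_xuat_hien > so_lan_xuat_hien_nhieu_nhat:
--       tu_xuat_hien_nhieu_nhat = tu
--       so_lan_xuat_hien_nhieu_nhat = so_lan_xuat_hien
--   return tu_xuat_hien_nhieu_nhat, so_lan_xuat_hien_nhieu_nhat
-- ===== SOURCE B (Python) =====
-- def tim_tu_xuat_hien_nhieu_nhat(chuoi):
--   words = chuoi.split()
--   word_set = set(words)
--   counts = {}
--   n = len(chuoi)
--   for length in sorted({len(w) for w in words}):
--     for i in range(n - length + 1):
--       sub = chuoi[i:i + length]
--       if sub in word_set:
--         counts[sub] = counts.get(sub, 0) + 1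
--   best, best_count = "", 0
--   for tu in words:
--     c = counts.get(tu, 0)
--     if c > best_count:
--       best, best_count = tu, c
--   return best, best_count
-- ===== Notes on version B (the rewrite author's own statement) =====
-- stated objective: faster
-- what changed: B inverts the loop structure: instead of scanning the whole string once per word (A), it slides a window over the string once per distinct word length, testing each window against a hash set of the words and accumulating occurrence counts in a dict, then picks the best word by a dict lookup per word.
import Mathlib
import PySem

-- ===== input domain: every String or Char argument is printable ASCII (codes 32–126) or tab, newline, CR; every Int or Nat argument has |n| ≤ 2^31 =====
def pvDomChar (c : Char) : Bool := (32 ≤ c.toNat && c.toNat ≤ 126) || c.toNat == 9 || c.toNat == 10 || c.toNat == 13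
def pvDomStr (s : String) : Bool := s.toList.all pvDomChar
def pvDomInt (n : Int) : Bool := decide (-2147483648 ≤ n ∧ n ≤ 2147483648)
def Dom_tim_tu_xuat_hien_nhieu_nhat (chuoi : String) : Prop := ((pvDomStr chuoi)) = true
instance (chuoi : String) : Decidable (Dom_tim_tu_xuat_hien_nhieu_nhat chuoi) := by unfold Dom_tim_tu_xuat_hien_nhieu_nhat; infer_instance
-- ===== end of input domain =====

-- B inverts A's loop structure: a sliding window over the string per distinct word length with a
-- hash-set membership test fills a count dict; the best word is then found by dict lookups. Objective: faster.

-- ===== PORT A =====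
-- helper dem_so_lan_xuat_hien: for i in range(len(chuoi)): if chuoi[i:].startswith(tu): count += 1
def pv_dem_so_lan_xuat_hien (chuoi tu_can_tim : String) : Int :=
  (PySem.List.pyRange 0 (PySem.Str.len chuoi)).foldl
    (fun so_lan i =>
      if PySem.Str.startswith (PySem.Str.slice chuoi (some i) none) tu_can_tim then so_lan + 1
      else so_lan) 0

def tim_tu_xuat_hien_nhieu_nhat (chuoi : String) : String × Int :=
  (PySem.Str.split₀ chuoi).foldl
    (fun st tu =>
      let c := pv_dem_so_lan_xuat_hien chuoi tu
      if c > st.2 then (tu, c) else st)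
    ("", 0)

-- ===== PORT B =====
def tim_tu_xuat_hien_nhieu_nhat_alt (chuoi : String) : String × Int :=
  let words := PySem.Str.split₀ chuoi
  let word_set := PySem.Set.ofList words
  let n := PySem.Str.len chuoi
  let counts :=
    (PySem.List.sorted (PySem.Set.ofList (words.map PySem.Str.len)) (fun x => x) false).foldl
      (fun (counts : PySem.Dict String Int) length =>
        (PySem.List.pyRange 0 (n - length + 1)).foldl
          (fun counts i =>
            let sub := PySem.Str.slice chuoi (some i) (some (i + length))
            if PySem.Set.contains word_set sub then counts.modify sub 0 (· + 1) else counts)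
          counts)
      PySem.Dict.empty
  words.foldl
    (fun (st : String × Int) tu =>
      let c := counts.getD tu 0
      if c > st.2 then (tu, c) else st)
    ("", 0)

-- ===== PRECONDITION & SPEC =====
def Spec_tim_tu_xuat_hien_nhieu_nhat (chuoi : String) (out : String × Int) : Prop := out = tim_tu_xuat_hien_nhieu_nhat_alt chuoi
instance (chuoi : String) (out : String × Int) : Decidable (Spec_tim_tu_xuat_hien_nhieu_nhat chuoi out) := by unfold Spec_tim_tu_xuat_hien_nhieu_nhat; infer_instance

-- ===== CLAIM (what is proved, stated in full; the proofs are below) =====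
def Claim_equal_tim_tu_xuat_hien_nhieu_nhat : Prop := ∀ (chuoi : String), Dom_tim_tu_xuat_hien_nhieu_nhat chuoi → Spec_tim_tu_xuat_hien_nhieu_nhat chuoi (tim_tu_xuat_hien_nhieu_nhat chuoi)

-- ===== LEMMAS AND PROOFS =====

def pvM (chuoi tu : String) : Nat :=
  (List.range chuoi.toList.length).countP (fun i => decide (tu.toList <+: chuoi.toList.drop i))

theorem pv_slice_toList (s : String) (a b : Option Int) :
    (PySem.Str.slice s a b).toList = PySem.List.slice s.toList a b := by
  simp [PySem.Str.slice]

theorem pv_contains_ofList (xs : List String) (y : String) :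
    PySem.Set.contains (PySem.Set.ofList xs) y = true ↔ y ∈ xs := by
  simp [PySem.Set.contains, PySem.Set.mem_ofList]

theorem pv_countP_range_ext (p : Nat → Bool) (m n : Nat) (h : m ≤ n)
    (hp : ∀ i, m ≤ i → i < n → p i = false) :
    (List.range n).countP p = (List.range m).countP p := by
  have : n = m + (n - m) := by omega
  rw [this, List.range_add, List.countP_append]
  have hz : ((List.range (n - m)).map (fun x => m + x)).countP p = 0 := by
    rw [List.countP_eq_zero]
    intro a ha
    rcases List.mem_map.1 ha with ⟨k, hk, rfl⟩
    rw [List.mem_range] at hk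
    simp [hp (m + k) (by omega) (by omega)]
  omega

theorem pv_inner_count (chuoi w : String) (hw : w ∈ PySem.Str.split₀ chuoi)
    (hne : w.toList ≠ []) (L : Int) (hL : 0 ≤ L) :
    ((PySem.List.pyRange 0 (PySem.Str.len chuoi - L + 1)).countP
        (fun i => (PySem.Str.slice chuoi (some i) (some (i + L)) == w)
          && PySem.Set.contains (PySem.Set.ofList (PySem.Str.split₀ chuoi))
              (PySem.Str.slice chuoi (some i) (some (i + L)))))
      = if L = (w.toList.length : Int) then pvM chuoi w else 0 := by
  set s := chuoi.toList with hs
  set t := w.toList with ht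
  set N := s.length with hN
  -- drop the membership conjunct and pass to list-level slice equality
  have h1 : ((PySem.List.pyRange 0 (PySem.Str.len chuoi - L + 1)).countP
        (fun i => (PySem.Str.slice chuoi (some i) (some (i + L)) == w)
          && PySem.Set.contains (PySem.Set.ofList (PySem.Str.split₀ chuoi))
              (PySem.Str.slice chuoi (some i) (some (i + L)))))
      = ((PySem.List.pyRange 0 (PySem.Str.len chuoi - L + 1)).countP
        (fun i => decide (PySem.List.slice s (some i) (some (i + L)) = t))) := by
    apply List.countP_congr
    intro i _
    by_cases h : PySem.Str.slice chuoi (some i) (some (i + L)) = w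
    · rw [h]
      have hc : PySem.Set.contains (PySem.Set.ofList (PySem.Str.split₀ chuoi)) w = true :=
        (pv_contains_ofList _ _).2 hw
      rw [hc]
      have : PySem.List.slice s (some i) (some (i + L)) = t := by
        rw [← pv_slice_toList, h]
      simp [this]
    · have hb : (PySem.Str.slice chuoi (some i) (some (i + L)) == w) = false := by
        simp [h]
      rw [hb]
      have : ¬ PySem.List.slice s (some i) (some (i + L)) = t := by
        intro hEq
        apply h
        rw [← String.toList_inj, pv_slice_toList]
        exact hEq
      simp [this]
  rw [h1]
  by_cases hif : L = (t.length : Int)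
  · rw [if_pos hif]
    subst hif
    by_cases hLN : t.length ≤ N
    · rw [PySem.Str.len_eq, ← hs, ← hN,
        show ((N : Int) - (t.length : Int) + 1) = ((N - t.length + 1 : Nat) : Int) by omega,
        PySem.List.pyRange_zero_natCast, List.countP_map]
      have h2 : ∀ k : Nat, decide (PySem.List.slice s (some ((k:Nat) : Int)) (some (((k:Nat):Int) + (t.length:Int))) = t)
          = decide (t <+: s.drop k) := by
        intro k
        rw [PySem.List.slice_natCast_add]
        rw [decide_eq_decide]
        constructor
        · intro h; rw [List.prefix_iff_eq_take]; exact h.symm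
        · intro h; exact (List.prefix_iff_eq_take.1 h).symm
      have h3 : ((List.range (N - t.length + 1)).countP
            ((fun i : Int => decide (PySem.List.slice s (some i) (some (i + (t.length:Int))) = t)) ∘ (fun k : Nat => (k : Int))))
          = (List.range (N - t.length + 1)).countP (fun k => decide (t <+: s.drop k)) := by
        apply List.countP_congr
        intro k _
        simp only [Function.comp_apply]
        rw [h2 k]
      rw [h3]
      unfold pvM
      rw [← hs, ← ht, ← hN]
      have hL1 : 1 ≤ t.length := List.length_pos_of_ne_nil hne
      rw [pv_countP_range_ext _ (N - t.length + 1) N (by omega)]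
      intro i hi1 hi2
      simp only [decide_eq_false_iff_not]
      intro hpre
      have := hpre.length_le
      rw [List.length_drop] at this
      omega
    · rw [PySem.List.pyRange_one_eq_nil (by rw [PySem.Str.len_eq, ← hs, ← hN]; omega)]
      have : pvM chuoi w = 0 := by
        unfold pvM
        rw [← hs, ← ht, ← hN, List.countP_eq_zero]
        intro i hi
        rw [List.mem_range] at hi
        simp only [decide_eq_true_eq]
        intro hpre
        have := hpre.length_le
        rw [List.length_drop] at this
        omega
      rw [this]
      rfl
  · rw [if_neg hif, List.countP_eq_zero]
    intro i hi
    rw [PySem.List.mem_pyRange_one] at hi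
    simp only [decide_eq_true_eq]
    intro hEq
    have hiL : 0 ≤ i := hi.1
    have hib : i < PySem.Str.len chuoi - L + 1 := hi.2
    rw [PySem.Str.len_eq, ← hs, ← hN] at hib
    rw [PySem.List.slice_toNat s hiL (by omega)] at hEq
    have hlen : ((i + L).toNat - i.toNat) = L.toNat := by omega
    rw [hlen] at hEq
    have : (List.take L.toNat (List.drop i.toNat s)).length = t.length := by rw [hEq]
    rw [List.length_take, List.length_drop] at this
    have : L.toNat = t.length := by omega
    apply hif
    omega

theorem pv_fold_filter {α : Type} (xs : List α) (C : α → Bool) (g : α → String)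
    (d : PySem.Dict String Int) :
    xs.foldl (fun d i => if C i then d.modify (g i) 0 (· + 1) else d) d
      = ((xs.filter C).map g).foldl (fun d x => d.modify x 0 (· + 1)) d := by
  induction xs generalizing d with
  | nil => rfl
  | cons x xs ih =>
    simp only [List.foldl_cons, List.filter_cons]
    by_cases h : C x
    · simp only [h, if_true, List.map_cons, List.foldl_cons]; exact ih _
    · simp only [h, Bool.false_eq_true, if_false]; exact ih _

theorem pv_getD_if_fold {α : Type} (xs : List α) (C : α → Bool) (g : α → String)
    (d : PySem.Dict String Int) (w : String) :
    (xs.foldl (fun d i => if C i then d.modify (g i) 0 (· + 1) else d) d).getD w 0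
      = d.getD w 0 + (xs.countP (fun i => (g i == w) && C i) : Int) := by
  rw [pv_fold_filter, PySem.Dict.getD_foldl_modify_add_one]
  congr 1
  norm_cast
  rw [List.count, List.countP_map, List.countP_filter]
  rfl

theorem pv_dem_eq (chuoi tu : String) : pv_dem_so_lan_xuat_hien chuoi tu = (pvM chuoi tu : Int) := by
  unfold pv_dem_so_lan_xuat_hien pvM
  rw [PySem.Str.len_eq, PySem.List.pyRange_zero_natCast, List.foldl_map,
    PySem.List.foldl_if_add_one, zero_add]
  congr 1
  apply List.countP_congr
  intro i _
  rw [Bool.eq_iff_iff]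
  simp [PySem.Str.startswith, PySem.Str.slice, PySem.List.slice_from_natCast, PySem.Chars.startswith_iff]

theorem pv_outer (chuoi w : String) (hw : w ∈ PySem.Str.split₀ chuoi) (hne : w.toList ≠ [])
    (Ls : List Int) :
    ∀ (d : PySem.Dict String Int), (∀ L ∈ Ls, 0 ≤ L) →
    (Ls.foldl (fun counts L =>
        (PySem.List.pyRange 0 (PySem.Str.len chuoi - L + 1)).foldl
          (fun counts i =>
            if PySem.Set.contains (PySem.Set.ofList (PySem.Str.split₀ chuoi))
                (PySem.Str.slice chuoi (some i) (some (i + L)))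
            then counts.modify (PySem.Str.slice chuoi (some i) (some (i + L))) 0 (· + 1)
            else counts)
          counts) d).getD w 0
      = d.getD w 0 + (Ls.count ((w.toList.length : Int)) : Int) * (pvM chuoi w : Int) := by
  induction Ls with
  | nil => intro d _; simp
  | cons L Ls ih =>
    intro d h0
    simp only [List.foldl_cons]
    rw [ih _ (fun L h => h0 L (List.mem_cons_of_mem _ h))]
    rw [pv_getD_if_fold (PySem.List.pyRange 0 (PySem.Str.len chuoi - L + 1))
      (fun i => PySem.Set.contains (PySem.Set.ofList (PySem.Str.split₀ chuoi))
        (PySem.Str.slice chuoi (some i) (some (i + L))))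
      (fun i => PySem.Str.slice chuoi (some i) (some (i + L))) d w]
    rw [pv_inner_count chuoi w hw hne L (h0 L List.mem_cons_self)]
    rw [List.count_cons]
    by_cases h : L = ((w.toList.length : Nat) : Int)
    · simp only [h, beq_self_eq_true, if_pos]
      push_cast
      ring
    · have hb : (L == ((w.toList.length : Nat) : Int)) = false := by
        rw [beq_eq_false_iff_ne]; exact h
      rw [if_neg h, hb]
      push_cast
      ring

theorem pv_split₀_go_ne_nil (s : List Char) : ∀ (cur : List Char) (acc : List (List Char)),
    (∀ a ∈ acc, a ≠ []) → ∀ w ∈ PySem.Chars.split₀.go s cur acc, w ≠ [] := by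
  induction s with
  | nil =>
    intro cur acc hacc w hw
    rw [PySem.Chars.split₀.go] at hw
    by_cases hc : cur.isEmpty
    · rw [if_pos hc, List.mem_reverse] at hw; exact hacc w hw
    · rw [if_neg hc, List.mem_reverse, List.mem_cons] at hw
      rcases hw with h | h
      · subst h; simp_all [List.isEmpty_iff]
      · exact hacc w h
  | cons c rest ih =>
    intro cur acc hacc w hw
    rw [PySem.Chars.split₀.go] at hw
    by_cases hsp : PySem.Chars.isspace c
    · rw [if_pos hsp] at hw
      by_cases hc : cur.isEmpty
      · rw [if_pos hc] at hw; exact ih [] acc hacc w hw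
      · rw [if_neg hc] at hw
        refine ih [] (cur.reverse :: acc) ?_ w hw
        intro a ha
        rcases List.mem_cons.1 ha with h | h
        · subst h; simp_all [List.isEmpty_iff]
        · exact hacc a h
    · rw [if_neg hsp] at hw; exact ih (c :: cur) acc hacc w hw

theorem pv_split₀_ne_nil (chuoi : String) : ∀ w ∈ PySem.Str.split₀ chuoi, w.toList ≠ [] := by
  intro w hw
  have : w.toList ∈ PySem.Chars.split₀ chuoi.toList := by
    rw [← PySem.Str.split₀_map_toList]; exact List.mem_map_of_mem hw
  exact pv_split₀_go_ne_nil chuoi.toList [] [] (by intro a ha; cases ha) w.toList this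

theorem pv_counts_getD (chuoi w : String) (hw : w ∈ PySem.Str.split₀ chuoi) :
    ((PySem.List.sorted (PySem.Set.ofList ((PySem.Str.split₀ chuoi).map PySem.Str.len)) (fun x => x) false).foldl
      (fun (counts : PySem.Dict String Int) length =>
        (PySem.List.pyRange 0 (PySem.Str.len chuoi - length + 1)).foldl
          (fun counts i =>
            if PySem.Set.contains (PySem.Set.ofList (PySem.Str.split₀ chuoi))
                (PySem.Str.slice chuoi (some i) (some (i + length)))
            then counts.modify (PySem.Str.slice chuoi (some i) (some (i + length))) 0 (· + 1)
            else counts)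
          counts)
      PySem.Dict.empty).getD w 0 = pv_dem_so_lan_xuat_hien chuoi w := by
  have hne : w.toList ≠ [] := pv_split₀_ne_nil chuoi w hw
  rw [pv_outer chuoi w hw hne _ PySem.Dict.empty ?h0]
  case h0 =>
    intro L hL
    rw [PySem.List.mem_sorted] at hL
    rw [PySem.Set.mem_ofList] at hL
    rcases List.mem_map.1 hL with ⟨w', _, rfl⟩
    rw [PySem.Str.len_eq]
    positivity
  have hperm := PySem.List.sorted_perm (PySem.Set.ofList ((PySem.Str.split₀ chuoi).map PySem.Str.len)) (fun x => x) false
  have hnd : (PySem.List.sorted (PySem.Set.ofList ((PySem.Str.split₀ chuoi).map PySem.Str.len)) (fun x => x) false).Nodup :=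
    (hperm.nodup_iff).2 (PySem.Set.nodup_ofList _)
  have hmem : ((w.toList.length : Nat) : Int) ∈ PySem.List.sorted (PySem.Set.ofList ((PySem.Str.split₀ chuoi).map PySem.Str.len)) (fun x => x) false := by
    rw [PySem.List.mem_sorted, PySem.Set.mem_ofList]
    have : PySem.Str.len w = ((w.toList.length : Nat) : Int) := PySem.Str.len_eq w
    rw [← this]
    exact List.mem_map_of_mem hw
  rw [List.count_eq_one_of_mem hnd hmem, pv_dem_eq]
  simp

-- ===== VERDICT (by name: the statement is the Claim_ definition above) =====
theorem tim_tu_xuat_hien_nhieu_nhat_spec : Claim_equal_tim_tu_xuat_hien_nhieu_nhat := by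
  intro chuoi _
  unfold Spec_tim_tu_xuat_hien_nhieu_nhat
  have hB : tim_tu_xuat_hien_nhieu_nhat_alt chuoi =
      (PySem.Str.split₀ chuoi).foldl
        (fun (st : String × Int) tu =>
          if ((PySem.List.sorted (PySem.Set.ofList ((PySem.Str.split₀ chuoi).map PySem.Str.len)) (fun x => x) false).foldl
              (fun (counts : PySem.Dict String Int) length =>
                (PySem.List.pyRange 0 (PySem.Str.len chuoi - length + 1)).foldl
                  (fun counts i =>
                    if PySem.Set.contains (PySem.Set.ofList (PySem.Str.split₀ chuoi))
                        (PySem.Str.slice chuoi (some i) (some (i + length)))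
                    then counts.modify (PySem.Str.slice chuoi (some i) (some (i + length))) 0 (· + 1)
                    else counts)
                  counts)
              PySem.Dict.empty).getD tu 0 > st.2
          then (tu, ((PySem.List.sorted (PySem.Set.ofList ((PySem.Str.split₀ chuoi).map PySem.Str.len)) (fun x => x) false).foldl
              (fun (counts : PySem.Dict String Int) length =>
                (PySem.List.pyRange 0 (PySem.Str.len chuoi - length + 1)).foldl
                  (fun counts i =>
                    if PySem.Set.contains (PySem.Set.ofList (PySem.Str.split₀ chuoi))
                        (PySem.Str.slice chuoi (some i) (some (i + length)))
                    then counts.modify (PySem.Str.slice chuoi (some i) (some (i + length))) 0 (· + 1)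
                    else counts)
                  counts)
              PySem.Dict.empty).getD tu 0)
          else st)
        ("", 0) := rfl
  rw [hB]
  unfold tim_tu_xuat_hien_nhieu_nhat
  apply PySem.List.foldl_congr_mem
  intro acc tu htu
  simp only []
  rw [pv_counts_getD chuoi tu htu]
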